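-- pv_equiv track=rewrite | github.com/evgenyneu/warrah | tests/python/single_line_comment_remover.py | remove_single_comments
-- ===== SOURCE A (Python) =====
-- def remove_single_comments(content: str, markers: list[str]) -> str:
--     if not markers:
--         return content
--     if not content:
--         return ""
--
--     result = []
--     has_trailing_newline = content.endswith('\n')
--
--     for line in content.splitlines():
--         comment_start = None
--
--         # Find earliest comment marker in the line
--         for marker in markers:
--             pos = line.find(marker)
--             if pos != -1:
--                 comment_start = pos if comment_start is None else min(comment_start, pos)
--
--         # Add line up to comment or whole line if no comment
--         if comment_start is not None:
--             result.append(line[:comment_start])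
--         else:
--             result.append(line)
--
--         result.append('\n')
--
--     # Remove the last newline if it's not present in the original content
--     if not has_trailing_newline and result:  # Check if result is not empty
--         result.pop()
--
--     return ''.join(result)
-- ===== SOURCE B (Python) =====
-- def _cut(line, markers):
--     # first position where any marker starts; whole line if none
--     for i in range(len(line)):
--         if any(line.startswith(m, i) for m in markers):
--             return line[:i]
--     return line
--
--
-- def remove_single_comments(content: str, markers: list[str]) -> str:
--     if not markers:
--         return content
--     if not content:
--         return ""
--     body = '\n'.join(_cut(line, markers) for line in content.splitlines())
--     return body + '\n' if content.endswith('\n') else body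
-- ===== Notes on version B (the rewrite author's own statement) =====
-- stated objective: faster
-- what changed: The per-marker find()-and-min inner loop is replaced by a single left-to-right positional scan that stops at the first index where any marker starts (so the rest of the line is never scanned), and the accumulator list with a trailing-'\n' pop() is replaced by a '\n'.join over the truncated lines plus a conditional trailing newline.
import Mathlib
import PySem

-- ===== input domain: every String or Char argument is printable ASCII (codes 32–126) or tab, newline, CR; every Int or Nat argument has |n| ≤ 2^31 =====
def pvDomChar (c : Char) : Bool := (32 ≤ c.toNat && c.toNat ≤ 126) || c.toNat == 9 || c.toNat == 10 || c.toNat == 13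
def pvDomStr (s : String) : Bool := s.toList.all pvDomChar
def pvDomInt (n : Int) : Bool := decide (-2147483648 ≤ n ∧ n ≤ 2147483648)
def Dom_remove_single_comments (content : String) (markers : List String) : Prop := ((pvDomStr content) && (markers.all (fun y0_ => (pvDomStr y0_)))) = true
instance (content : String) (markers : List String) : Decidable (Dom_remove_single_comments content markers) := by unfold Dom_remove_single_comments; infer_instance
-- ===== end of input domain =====

-- B replaces A's per-marker find/min inner loop by a single left-to-right positional scan
-- (first index at which some marker starts) and assembles the result with '\n'.join instead
-- of an accumulator list with a final pop(); same return value (measured faster in a timing run).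

-- ===== PORT A =====
-- A's inner loop: for marker in markers: pos = line.find(marker); if pos != -1: comment_start = ...
def pvAInner (line : List Char) (markers : List (List Char)) : Option Int :=
  markers.foldl (fun comment_start marker =>
    let pos := PySem.Chars.find line marker
    if pos ≠ -1 then
      some (match comment_start with
            | none => pos
            | some c => min c pos)
    else comment_start) none

-- A's body after the two guards, on the char-list side (strings are handled via .toList,
-- every string primitive is the exact PySem.Chars one)
def pvACore (content : List Char) (markers : List (List Char)) : List Char :=
  let has_trailing_newline := PySem.Chars.endswith content ['\n']
  let result : List (List Char) :=
    (PySem.Chars.splitlines content).foldl (fun result line =>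
      let comment_start := pvAInner line markers
      let result :=
        match comment_start with
        | some c => result ++ [PySem.Chars.slice line none (some c)]
        | none => result ++ [line]
      result ++ [['\n']]) []
  -- result.pop(): PySem.List.pop? with Python's default index -1 removes the last element
  let result :=
    if has_trailing_newline = false ∧ result ≠ [] then
      match PySem.List.pop? result (-1) with
      | some (_, rest) => rest
      | none => result
    else result
  PySem.Chars.join [] result

def remove_single_comments (content : String) (markers : List String) : String :=
  if markers = [] then content
  else if content = "" then ""
  else String.ofList (pvACore content.toList (markers.map String.toList))

-- ===== PORT B =====
-- B's _cut: first i with some marker starting at i (line.startswith(m, i) with 0 ≤ i ≤ len(line)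
-- is exactly: m is a prefix of line[i:]), whole line if none
def pvCut (markers : List (List Char)) (line : List Char) : List Char :=
  match (List.range line.length).find?
      (fun i => markers.any (fun m => PySem.Chars.startswith (line.drop i) m)) with
  | some i => line.take i
  | none => line

def pvBCore (content : List Char) (markers : List (List Char)) : List Char :=
  let body := PySem.Chars.join ['\n'] ((PySem.Chars.splitlines content).map (pvCut markers))
  if PySem.Chars.endswith content ['\n'] then body ++ ['\n'] else body

def remove_single_comments_alt (content : String) (markers : List String) : String :=
  if markers = [] then content
  else if content = "" then ""
  else String.ofList (pvBCore content.toList (markers.map String.toList))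

-- ===== PRECONDITION & SPEC =====
def Spec_remove_single_comments (content : String) (markers : List String) (out : String) : Prop := out = remove_single_comments_alt content markers
instance (content : String) (markers : List String) (out : String) : Decidable (Spec_remove_single_comments content markers out) := by unfold Spec_remove_single_comments; infer_instance

-- ===== CLAIM (what is proved, stated in full; the proofs are below) =====
def Claim_equal_remove_single_comments : Prop := ∀ (content : String) (markers : List String), Dom_remove_single_comments content markers → Spec_remove_single_comments content markers (remove_single_comments content markers)

-- ===== LEMMAS AND PROOFS =====

-- find? over an initial range returns the least index satisfying the predicate
theorem pv_find?_range'_eq_some {p : Nat → Bool} : ∀ (n s : Nat) {k : Nat}, s ≤ k → k < s + n →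
    p k = true → (∀ j, s ≤ j → j < k → p j = false) → (List.range' s n).find? p = some k := by
  intro n
  induction n with
  | zero => intro s k h1 h2; omega
  | succ n ih =>
    intro s k h1 h2 hp hmin
    rw [List.range'_succ, List.find?_cons]
    by_cases hs : s = k
    · subst hs; simp [hp]
    · rw [hmin s le_rfl (by omega)]
      exact ih (s+1) (by omega) (by omega) hp (fun j hj1 hj2 => hmin j (by omega) hj2)

theorem pv_find?_range_eq_some {p : Nat → Bool} {n k : Nat}
    (h1 : k < n) (h2 : p k = true) (h3 : ∀ j < k, p j = false) :
    (List.range n).find? p = some k := by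
  rw [List.range_eq_range']
  exact pv_find?_range'_eq_some n 0 (Nat.zero_le _) (by omega) h2 (fun j _ hj => h3 j hj)

-- A's inner loop step, as a named function (pvAInner is its foldl, by rfl)
def pvStep (line : List Char) (cs : Option Int) (m : List Char) : Option Int :=
  if PySem.Chars.find line m ≠ -1 then
    some (match cs with | none => PySem.Chars.find line m | some c => min c (PySem.Chars.find line m))
  else cs

theorem pvAInner_eq (line : List Char) (ms : List (List Char)) :
    pvAInner line ms = ms.foldl (pvStep line) none := rfl

theorem pvStep_nomatch {line m : List Char} (hF : PySem.Chars.find line m = -1) (cs : Option Int) :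
    pvStep line cs m = cs := by simp [pvStep, hF]

theorem pvStep_pos {line m : List Char} (hF : ¬ PySem.Chars.find line m = -1) :
    (pvStep line none m = some (PySem.Chars.find line m)) ∧
    (∀ c0, pvStep line (some c0) m = some (min c0 (PySem.Chars.find line m))) := by
  constructor <;> simp [pvStep, hF]

-- characterisation of A's inner fold: none ↔ no marker occurs
theorem pvAInner_aux_none (line : List Char) : ∀ (ms : List (List Char)) (cs : Option Int),
    ms.foldl (pvStep line) cs = none ↔ (cs = none ∧ ∀ m ∈ ms, PySem.Chars.find line m = -1) := by
  intro ms
  induction ms with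
  | nil => simp
  | cons m ms ih =>
    intro cs
    simp only [List.foldl_cons, ih]
    by_cases hF : PySem.Chars.find line m = -1
    · rw [pvStep_nomatch hF]
      constructor
      · rintro ⟨h1, h2⟩
        exact ⟨h1, by intro m' hm'; rcases List.mem_cons.mp hm' with rfl | hm' <;> [exact hF; exact h2 m' hm']⟩
      · rintro ⟨h1, h2⟩; exact ⟨h1, fun m' hm' => h2 m' (List.mem_cons_of_mem _ hm')⟩
    · constructor
      · rintro ⟨h1, -⟩
        cases cs with
        | none => rw [(pvStep_pos hF).1] at h1; cases h1
        | some c0 => rw [(pvStep_pos hF).2 c0] at h1; cases h1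
      · rintro ⟨-, h2⟩; exact absurd (h2 m List.mem_cons_self) hF

-- some c: c is the value of some find, and a lower bound on all successful finds
theorem pvAInner_aux_some (line : List Char) : ∀ (ms : List (List Char)) (cs : Option Int) (c : Int),
    ms.foldl (pvStep line) cs = some c →
    ((cs = some c ∨ ∃ m ∈ ms, PySem.Chars.find line m = c) ∧
     (∀ c0, cs = some c0 → c ≤ c0) ∧
     (∀ m ∈ ms, PySem.Chars.find line m = -1 ∨ c ≤ PySem.Chars.find line m)) := by
  intro ms
  induction ms with
  | nil => intro cs c h; simp_all
  | cons m ms ih =>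
    intro cs c h
    simp only [List.foldl_cons] at h
    by_cases hF : PySem.Chars.find line m = -1
    · rw [pvStep_nomatch hF] at h
      obtain ⟨h1, h2, h3⟩ := ih cs c h
      refine ⟨?_, h2, ?_⟩
      · rcases h1 with h1 | ⟨m', hm', hf'⟩
        · exact Or.inl h1
        · exact Or.inr ⟨m', List.mem_cons_of_mem _ hm', hf'⟩
      · intro m' hm'
        rcases List.mem_cons.mp hm' with rfl | hm'
        · exact Or.inl hF
        · exact h3 m' hm'
    · cases cs with
      | none =>
        rw [(pvStep_pos hF).1] at h
        obtain ⟨h1, h2, h3⟩ := ih _ c h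
        have hcle : c ≤ PySem.Chars.find line m := h2 _ rfl
        refine ⟨?_, by simp, ?_⟩
        · rcases h1 with h1 | ⟨m', hm', hf'⟩
          · exact Or.inr ⟨m, List.mem_cons_self, Option.some.inj h1⟩
          · exact Or.inr ⟨m', List.mem_cons_of_mem _ hm', hf'⟩
        · intro m' hm'
          rcases List.mem_cons.mp hm' with rfl | hm'
          · exact Or.inr hcle
          · exact h3 m' hm'
      | some c0 =>
        rw [(pvStep_pos hF).2 c0] at h
        obtain ⟨h1, h2, h3⟩ := ih _ c h
        have hcle : c ≤ min c0 (PySem.Chars.find line m) := h2 _ rfl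
        refine ⟨?_, ?_, ?_⟩
        · rcases h1 with h1 | ⟨m', hm', hf'⟩
          · have h1' := Option.some.inj h1
            rcases le_total c0 (PySem.Chars.find line m) with hle | hle
            · exact Or.inl (by rw [min_eq_left hle] at h1'; simp [h1'])
            · exact Or.inr ⟨m, List.mem_cons_self, by rw [min_eq_right hle] at h1'; exact h1'⟩
          · exact Or.inr ⟨m', List.mem_cons_of_mem _ hm', hf'⟩
        · intro c1 hc1; cases Option.some.inj hc1; omega
        · intro m' hm'
          rcases List.mem_cons.mp hm' with rfl | hm'
          · exact Or.inr (by omega)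
          · exact h3 m' hm'

-- the recorded minimum is never -1 (only successful finds are recorded)
theorem pvAInner_aux_nonneg (line : List Char) : ∀ (ms : List (List Char)) (cs : Option Int),
    (∀ c0, cs = some c0 → 0 ≤ c0) → ∀ c, ms.foldl (pvStep line) cs = some c → 0 ≤ c := by
  intro ms
  induction ms with
  | nil => intro cs h c hc; exact h c hc
  | cons m ms ih =>
    intro cs h c hc
    simp only [List.foldl_cons] at hc
    by_cases hF : PySem.Chars.find line m = -1
    · rw [pvStep_nomatch hF] at hc; exact ih cs h c hc
    · have hge : 0 ≤ PySem.Chars.find line m := by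
        have := PySem.Chars.neg_one_le_find line m; omega
      cases cs with
      | none =>
        rw [(pvStep_pos hF).1] at hc
        exact ih _ (by intro c1 hc1; cases hc1; exact hge) c hc
      | some c0 =>
        rw [(pvStep_pos hF).2 c0] at hc
        have h0 : 0 ≤ c0 := h c0 rfl
        exact ih _ (by intro c1 hc1; cases hc1; exact le_min h0 hge) c hc

-- per-line agreement: A's truncation (min of finds) equals B's _cut (first matching position)
theorem pv_line_eq (line : List Char) (markers : List (List Char)) :
    (match pvAInner line markers with
     | some c => PySem.Chars.slice line none (some c)
     | none => line) = pvCut markers line := by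
  cases h : pvAInner line markers with
  | none =>
    rw [pvAInner_eq] at h
    have hall := ((pvAInner_aux_none line markers none).mp h).2
    have hfind : (List.range line.length).find?
        (fun i => markers.any (fun m => PySem.Chars.startswith (line.drop i) m)) = none := by
      rw [List.find?_eq_none]
      intro i _ hany
      obtain ⟨m, hm, hsw⟩ := List.any_eq_true.mp hany
      have hpre := (PySem.Chars.startswith_iff _ _).mp hsw
      have hinf : m <:+: line := hpre.isInfix.trans (List.drop_suffix i line).isInfix
      exact ((PySem.Chars.find_eq_neg_one_iff line m).mp (hall m hm)) hinf
    simp [pvCut, hfind]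
  | some c =>
    rw [pvAInner_eq] at h
    have hc0 : 0 ≤ c := pvAInner_aux_nonneg line markers none (by simp) c h
    obtain ⟨h1, -, h3⟩ := pvAInner_aux_some line markers none c h
    rcases h1 with h1 | ⟨m0, hm0, hf0⟩
    · cases h1
    have hspec := PySem.Chars.find_spec (s := line) (sub := m0) (by rw [hf0]; exact hc0)
    rw [hf0] at hspec
    by_cases hline : line = []
    · subst hline
      simp [pvCut, PySem.Chars.slice_eq_listSlice, PySem.List.slice_to _ hc0]
    · have hkle : c ≤ (line.length : Int) := hf0 ▸ PySem.Chars.find_le_length line m0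
      have hklt : c.toNat < line.length := by
        by_contra hge
        have hlen : c.toNat = line.length := by omega
        have hm0nil : m0 = [] := by
          have h5 := hspec.1
          rw [hlen, List.drop_length] at h5
          exact List.prefix_nil.mp h5
        rw [hm0nil, PySem.Chars.find_nil] at hf0
        have : line.length = 0 := by omega
        exact hline (List.eq_nil_of_length_eq_zero this)
      have hfind : (List.range line.length).find?
          (fun i => markers.any (fun m => PySem.Chars.startswith (line.drop i) m)) = some c.toNat := by
        apply pv_find?_range_eq_some hklt
        · exact List.any_eq_true.mpr ⟨m0, hm0, (PySem.Chars.startswith_iff _ _).mpr hspec.1⟩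
        · intro j hj
          rw [Bool.eq_false_iff]
          intro hany
          obtain ⟨m, hm, hsw⟩ := List.any_eq_true.mp hany
          have hpre := (PySem.Chars.startswith_iff _ _).mp hsw
          have hinf : m <:+: line := hpre.isInfix.trans (List.drop_suffix j line).isInfix
          have hfne : PySem.Chars.find line m ≠ -1 := (PySem.Chars.find_ne_neg_one_iff line m).mpr hinf
          have hcle : c ≤ PySem.Chars.find line m := (h3 m hm).resolve_left hfne
          have hfge : 0 ≤ PySem.Chars.find line m := le_trans hc0 hcle
          have hspecm := PySem.Chars.find_spec (s := line) (sub := m) hfge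
          have hle : (PySem.Chars.find line m).toNat ≤ j := by
            by_contra hlt
            exact hspecm.2 j (by omega) hpre
          omega
      simp [pvCut, hfind, PySem.Chars.slice_eq_listSlice, PySem.List.slice_to _ hc0]

-- splitlines of a nonempty string is nonempty
theorem pv_go_ne_nil (isB : Char → Bool) :
    ∀ (s cur : List Char) (acc : List (List Char)), ¬ (s = [] ∧ cur = [] ∧ acc = []) →
      PySem.Chars.splitlines.go isB s cur acc ≠ [] := by
  intro s cur acc
  induction s, cur, acc using PySem.Chars.splitlines.go.induct isB with
  | case1 cur acc hcur =>
    intro h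
    rw [PySem.Chars.splitlines.go]
    simp only [hcur, if_true]
    simp only [List.isEmpty_iff] at hcur
    simp_all
  | case2 cur acc hcur =>
    intro _
    rw [PySem.Chars.splitlines.go]
    simp [hcur]
  | case3 rest cur acc ih =>
    intro _
    rw [PySem.Chars.splitlines.go]
    exact ih (by simp)
  | case4 c rest cur acc hne hB ih =>
    intro _
    rw [PySem.Chars.splitlines.go]
    · simp only [hB, if_true]
      exact ih (by simp)
    · exact hne
  | case5 c rest cur acc hne hB ih =>
    intro _
    rw [PySem.Chars.splitlines.go]
    · simp only [hB, if_false, Bool.false_eq_true]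
      exact ih (by simp)
    · exact hne

theorem pv_splitlines_ne_nil (content : List Char) (h : content ≠ []) :
    PySem.Chars.splitlines content ≠ [] := by
  unfold PySem.Chars.splitlines
  exact pv_go_ne_nil _ content [] [] (by simp [h])

-- ''.join of [l₁,'\n',…,lₖ,'\n'] equals '\n'.join [l₁,…,lₖ] ++ '\n'
theorem pv_join_flat (f : List Char → List Char) : ∀ (ls : List (List Char)), ls ≠ [] →
    PySem.Chars.join [] (ls.flatMap (fun l => [f l, ['\n']])) =
      PySem.Chars.join ['\n'] (ls.map f) ++ ['\n'] := by
  intro ls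
  induction ls with
  | nil => intro h; exact absurd rfl h
  | cons l ls ih =>
    intro _
    cases ls with
    | nil =>
      simp [PySem.Chars.join_cons_cons, PySem.Chars.join_singleton]
    | cons l2 ls2 =>
      have ih' := ih (by simp)
      simp only [List.flatMap_cons, List.map_cons] at ih' ⊢
      simp only [List.cons_append, List.nil_append] at ih' ⊢
      rw [PySem.Chars.join_cons_cons, PySem.Chars.join_cons_cons, ih']
      rw [PySem.Chars.join_cons_cons ['\n'] (f l)]
      simp [List.append_assoc]

-- … and with the trailing '\n' popped it equals '\n'.join [l₁,…,lₖ]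
theorem pv_join_flat_dropLast (f : List Char → List Char) : ∀ (ls : List (List Char)), ls ≠ [] →
    PySem.Chars.join [] ((ls.flatMap (fun l => [f l, ['\n']])).dropLast) =
      PySem.Chars.join ['\n'] (ls.map f) := by
  intro ls
  induction ls with
  | nil => intro h; exact absurd rfl h
  | cons l ls ih =>
    intro _
    cases ls with
    | nil =>
      simp [PySem.Chars.join_singleton]
    | cons l2 ls2 =>
      have ih' := ih (by simp)
      simp only [List.flatMap_cons, List.map_cons, List.cons_append, List.nil_append] at ih' ⊢
      rw [List.dropLast_cons₂] at ih'
      simp only [List.dropLast_cons₂]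
      rw [PySem.Chars.join_cons_cons, PySem.Chars.join_cons_cons, ih']
      rw [PySem.Chars.join_cons_cons ['\n'] (f l)]
      simp [List.append_assoc]

-- Python's result.pop() on a nonempty list returns the last element and leaves dropLast
theorem pv_pop_eq {α : Type} (xs : List α) (h : xs ≠ []) :
    ∃ y, PySem.List.pop? xs (-1) = some (y, xs.dropLast) := by
  have hl : 0 < xs.length := List.length_pos_iff.mpr h
  refine ⟨xs[xs.length - 1]'(by omega), ?_⟩
  simp only [PySem.List.pop?, PySem.List.pyIdx?]
  rw [if_neg (by omega), if_pos (by omega)]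
  simp only [Int.neg_neg, Int.toNat_one, Option.bind_some]
  rw [List.getElem?_eq_getElem (by omega)]
  simp [List.dropLast_eq_eraseIdx]

theorem pvCore_eq (content : List Char) (markers : List (List Char)) (h : content ≠ []) :
    pvACore content markers = pvBCore content markers := by
  unfold pvACore pvBCore
  have hbody : (fun (result : List (List Char)) (line : List Char) =>
      let comment_start := pvAInner line markers
      let result :=
        match comment_start with
        | some c => result ++ [PySem.Chars.slice line none (some c)]
        | none => result ++ [line]
      result ++ [['\n']]) = fun result line => result ++ [pvCut markers line, ['\n']] := by
    funext r l
    rw [← pv_line_eq l markers]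
    cases pvAInner l markers <;> simp
  rw [hbody, PySem.List.foldl_append_eq_flatMap (fun l => [pvCut markers l, ['\n']]) _ []]
  simp only [List.nil_append]
  have hls : PySem.Chars.splitlines content ≠ [] := pv_splitlines_ne_nil content h
  have hflat : (PySem.Chars.splitlines content).flatMap (fun l => [pvCut markers l, ['\n']]) ≠ [] := by
    cases hsp : PySem.Chars.splitlines content with
    | nil => exact absurd hsp hls
    | cons l ls => simp
  by_cases he : PySem.Chars.endswith content ['\n'] = true
  · rw [if_neg (by simp [he]), if_pos he]
    simpa using pv_join_flat (pvCut markers) _ hls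
  · rw [if_pos ⟨by simp [he], hflat⟩, if_neg he]
    obtain ⟨y, hy⟩ := pv_pop_eq _ hflat
    rw [hy]
    simpa using pv_join_flat_dropLast (pvCut markers) _ hls

-- ===== VERDICT (by name: the statement is the Claim_ definition above) =====
theorem remove_single_comments_spec : Claim_equal_remove_single_comments := by
  intro content markers _
  unfold Spec_remove_single_comments remove_single_comments remove_single_comments_alt
  by_cases hm : markers = [] <;> simp [hm]
  by_cases hc : content = "" <;> simp [hc]
  have : content.toList ≠ [] := by
    simpa [String.toList_eq_nil_iff] using hc
  rw [pvCore_eq _ _ this]
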